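-- pv_equiv track=rewrite | github.com/ayush286/AlgoExpert | SameBsts.py | isSequenceSameWithinRangePlus
-- ===== SOURCE A (Python) =====
-- def isSequenceSameWithinRangePlus(startOne, endOne, startTwo, endTwo, arrayOne, arrayTwo):
-- 	stackOne = []
-- 	stackTwo = []
-- 	for index in range(len(arrayOne)):
-- 		if arrayOne[index] >= arrayOne[startOne] and arrayOne[index] < arrayOne[endOne]:
-- 			stackOne.append(arrayOne[index])
-- 	for index in range(len(arrayTwo)):
-- 		if arrayTwo[index] >= arrayTwo[startTwo] and arrayTwo[index] < arrayTwo[endTwo]: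
-- 			stackTwo.append(arrayTwo[index])
-- 	return stackOne == stackTwo
-- ===== SOURCE B (Python) =====
-- def isSequenceSameWithinRangePlus(startOne, endOne, startTwo, endTwo, arrayOne, arrayTwo):
--     # Single pass over arrayOne driving a cursor j through arrayTwo: each kept element
--     # of arrayOne must match the next kept element at/after j; no intermediate lists.
--     j = 0
--     n2 = len(arrayTwo)
--     for x in arrayOne:
--         if arrayOne[startOne] <= x < arrayOne[endOne]:
--             while j < n2 and not (arrayTwo[startTwo] <= arrayTwo[j] < arrayTwo[endTwo]):
--                 j += 1
--             if j == n2 or arrayTwo[j] != x: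
--                 return False
--             j += 1
--     while j < n2:
--         if arrayTwo[startTwo] <= arrayTwo[j] < arrayTwo[endTwo]:
--             return False
--         j += 1
--     return True
-- ===== Notes on version B (the rewrite author's own statement) =====
-- stated objective: alternative
-- what changed: B never materializes the two filtered stacks: a single loop over arrayOne drives an integer cursor j through arrayTwo, matching each kept element of arrayOne against the next kept element of arrayTwo in place and exiting on the first mismatch, with a final sweep checking no kept element of arrayTwo remains.
import Mathlib
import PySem

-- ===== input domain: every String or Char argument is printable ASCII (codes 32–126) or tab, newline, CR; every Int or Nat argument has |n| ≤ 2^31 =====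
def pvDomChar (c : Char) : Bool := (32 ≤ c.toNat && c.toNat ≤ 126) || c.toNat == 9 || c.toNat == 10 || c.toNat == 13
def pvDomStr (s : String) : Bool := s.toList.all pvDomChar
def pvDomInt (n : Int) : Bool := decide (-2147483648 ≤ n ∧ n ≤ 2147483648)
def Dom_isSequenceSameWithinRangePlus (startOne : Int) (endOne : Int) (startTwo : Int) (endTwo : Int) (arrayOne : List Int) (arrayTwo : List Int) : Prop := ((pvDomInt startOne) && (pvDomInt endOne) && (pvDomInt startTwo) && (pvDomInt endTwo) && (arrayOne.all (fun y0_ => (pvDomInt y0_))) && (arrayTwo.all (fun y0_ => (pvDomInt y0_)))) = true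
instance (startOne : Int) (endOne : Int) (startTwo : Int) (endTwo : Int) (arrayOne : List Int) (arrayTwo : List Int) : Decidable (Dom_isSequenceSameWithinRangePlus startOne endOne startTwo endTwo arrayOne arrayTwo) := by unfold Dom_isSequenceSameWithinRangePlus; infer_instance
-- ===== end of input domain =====

-- B replaces "build two filtered lists, then compare" by one loop over arrayOne driving an
-- integer cursor through arrayTwo, matching kept elements in place with early exit (alternative).


-- ===== PORT A =====
-- Literal port: two index loops building stackOne/stackTwo, then list equality.
def isSequenceSameWithinRangePlus (startOne : Int) (endOne : Int) (startTwo : Int) (endTwo : Int) (arrayOne : List Int) (arrayTwo : List Int) : Bool :=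
  let stackOne := (PySem.List.pyRange 0 (arrayOne.length : Int) 1).foldl
    (fun acc index =>
      if PySem.List.pyGetD arrayOne index 0 ≥ PySem.List.pyGetD arrayOne startOne 0 ∧
         PySem.List.pyGetD arrayOne index 0 < PySem.List.pyGetD arrayOne endOne 0
      then acc ++ [PySem.List.pyGetD arrayOne index 0] else acc) []
  let stackTwo := (PySem.List.pyRange 0 (arrayTwo.length : Int) 1).foldl
    (fun acc index =>
      if PySem.List.pyGetD arrayTwo index 0 ≥ PySem.List.pyGetD arrayTwo startTwo 0 ∧
         PySem.List.pyGetD arrayTwo index 0 < PySem.List.pyGetD arrayTwo endTwo 0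
      then acc ++ [PySem.List.pyGetD arrayTwo index 0] else acc) []
  stackOne == stackTwo

-- ===== PORT B =====
-- the inner 'while j < n2 and not keep2(arrayTwo[j]): j += 1' loop
def pvAdvance (lo2 hi2 : Int) (a2 : List Int) (j : Nat) : Nat :=
  if h : j < a2.length then
    if lo2 ≤ a2[j] ∧ a2[j] < hi2 then j else pvAdvance lo2 hi2 a2 (j + 1)
  else j
termination_by a2.length - j

-- the final 'while j < n2: if keep2(arrayTwo[j]): return False; j += 1' sweep
def pvTailClean (lo2 hi2 : Int) (a2 : List Int) (j : Nat) : Bool :=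
  if h : j < a2.length then
    if lo2 ≤ a2[j] ∧ a2[j] < hi2 then false else pvTailClean lo2 hi2 a2 (j + 1)
  else true
termination_by a2.length - j

-- cursor state: none = already returned False, some j = current position in arrayTwo
def isSequenceSameWithinRangePlus_alt (startOne : Int) (endOne : Int) (startTwo : Int) (endTwo : Int) (arrayOne : List Int) (arrayTwo : List Int) : Bool :=
  let lo1 := PySem.List.pyGetD arrayOne startOne 0
  let hi1 := PySem.List.pyGetD arrayOne endOne 0
  let lo2 := PySem.List.pyGetD arrayTwo startTwo 0
  let hi2 := PySem.List.pyGetD arrayTwo endTwo 0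
  match arrayOne.foldl
    (fun st x =>
      match st with
      | none => none
      | some j =>
        if lo1 ≤ x ∧ x < hi1 then
          let j' := pvAdvance lo2 hi2 arrayTwo j
          if h : j' < arrayTwo.length then
            if arrayTwo[j'] = x then some (j' + 1) else none
          else none
        else some j) (some 0) with
  | none => false
  | some j => pvTailClean lo2 hi2 arrayTwo j

-- ===== PRECONDITION & SPEC =====
-- Pre_ excludes exactly the inputs where Python A raises IndexError: a nonempty array
-- whose start/end bound index is out of Python range.
def Pre_isSequenceSameWithinRangePlus (startOne : Int) (endOne : Int) (startTwo : Int) (endTwo : Int) (arrayOne : List Int) (arrayTwo : List Int) : Prop :=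
  (arrayOne ≠ [] → PySem.Raise.InRange arrayOne.length startOne ∧ PySem.Raise.InRange arrayOne.length endOne) ∧
  (arrayTwo ≠ [] → PySem.Raise.InRange arrayTwo.length startTwo ∧ PySem.Raise.InRange arrayTwo.length endTwo)
instance (startOne : Int) (endOne : Int) (startTwo : Int) (endTwo : Int) (arrayOne : List Int) (arrayTwo : List Int) : Decidable (Pre_isSequenceSameWithinRangePlus startOne endOne startTwo endTwo arrayOne arrayTwo) := by unfold Pre_isSequenceSameWithinRangePlus; infer_instance

def pvWitness_isSequenceSameWithinRangePlus : Int × Int × Int × Int × List Int × List Int :=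
  (0, 2, 0, 2, [1, 2, 3], [1, 2, 3])

def Spec_isSequenceSameWithinRangePlus (startOne : Int) (endOne : Int) (startTwo : Int) (endTwo : Int) (arrayOne : List Int) (arrayTwo : List Int) (out : Bool) : Prop := out = isSequenceSameWithinRangePlus_alt startOne endOne startTwo endTwo arrayOne arrayTwo
instance (startOne : Int) (endOne : Int) (startTwo : Int) (endTwo : Int) (arrayOne : List Int) (arrayTwo : List Int) (out : Bool) : Decidable (Spec_isSequenceSameWithinRangePlus startOne endOne startTwo endTwo arrayOne arrayTwo out) := by unfold Spec_isSequenceSameWithinRangePlus; infer_instance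

-- ===== CLAIM =====
def Claim_equal_isSequenceSameWithinRangePlus : Prop := ∀ (startOne : Int) (endOne : Int) (startTwo : Int) (endTwo : Int) (arrayOne : List Int) (arrayTwo : List Int), Dom_isSequenceSameWithinRangePlus startOne endOne startTwo endTwo arrayOne arrayTwo → Pre_isSequenceSameWithinRangePlus startOne endOne startTwo endTwo arrayOne arrayTwo → Spec_isSequenceSameWithinRangePlus startOne endOne startTwo endTwo arrayOne arrayTwo (isSequenceSameWithinRangePlus startOne endOne startTwo endTwo arrayOne arrayTwo)

-- ===== LEMMAS AND PROOFS =====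

-- A's index loop builds exactly the filtered list
theorem stack_eq_filter (s e : Int) (arr : List Int) :
    (PySem.List.pyRange 0 (arr.length : Int) 1).foldl
      (fun acc index =>
        if PySem.List.pyGetD arr index 0 ≥ PySem.List.pyGetD arr s 0 ∧
           PySem.List.pyGetD arr index 0 < PySem.List.pyGetD arr e 0
        then acc ++ [PySem.List.pyGetD arr index 0] else acc) [] =
    arr.filter (fun x => decide (PySem.List.pyGetD arr s 0 ≤ x ∧ x < PySem.List.pyGetD arr e 0)) := by
  rw [PySem.List.foldl_pyRange_zero_pyGetD' arr 0
      (fun acc x => if x ≥ PySem.List.pyGetD arr s 0 ∧ x < PySem.List.pyGetD arr e 0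
                    then acc ++ [x] else acc) []]
  rw [PySem.List.foldl_append_ite_eq_filter]
  simp [ge_iff_le]

-- pvAdvance skips only non-kept elements and stops at a kept one (or at the end)
theorem pvAdvance_spec (lo2 hi2 : Int) (a2 : List Int) (j : Nat) :
    ((a2.drop j).filter (fun x => decide (lo2 ≤ x ∧ x < hi2)) =
      (a2.drop (pvAdvance lo2 hi2 a2 j)).filter (fun x => decide (lo2 ≤ x ∧ x < hi2))) ∧
    (∀ h : pvAdvance lo2 hi2 a2 j < a2.length,
      lo2 ≤ a2[pvAdvance lo2 hi2 a2 j] ∧ a2[pvAdvance lo2 hi2 a2 j] < hi2) := by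
  fun_induction pvAdvance lo2 hi2 a2 j with
  | case1 j h hk => exact ⟨rfl, fun _ => hk⟩
  | case2 j h hk ih =>
    refine ⟨?_, ih.2⟩
    rw [List.drop_eq_getElem_cons h, List.filter_cons, if_neg (by simpa using hk)]
    exact ih.1
  | case3 j h => exact ⟨rfl, fun h' => absurd h' h⟩

-- the final sweep decides whether any kept element remains
theorem pvTailClean_eq (lo2 hi2 : Int) (a2 : List Int) (j : Nat) :
    pvTailClean lo2 hi2 a2 j =
      ((a2.drop j).filter (fun x => decide (lo2 ≤ x ∧ x < hi2)) == []) := by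
  fun_induction pvTailClean lo2 hi2 a2 j with
  | case1 j h hk =>
    rw [List.drop_eq_getElem_cons h, List.filter_cons, if_pos (by simpa using hk)]
    simp
  | case2 j h hk ih =>
    rw [List.drop_eq_getElem_cons h, List.filter_cons, if_neg (by simpa using hk)]
    exact ih
  | case3 j h =>
    rw [List.drop_eq_nil_of_le (by omega)]
    simp

-- the 'none' state is absorbing
theorem foldl_none_absorb (f : Option Nat → Int → Option Nat) (hf : f none = fun _ => none)
    (l : List Int) : l.foldl f none = none := by
  induction l with
  | nil => rfl
  | cons x rest ih => simp only [List.foldl_cons, hf]; exact ih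

-- the main loop + final sweep compute equality of the two filtered lists
theorem loop_eq_filter (lo1 hi1 lo2 hi2 : Int) (a2 : List Int) (a1 : List Int) (j : Nat) :
    (match a1.foldl
      (fun st x =>
        match st with
        | none => none
        | some j =>
          if lo1 ≤ x ∧ x < hi1 then
            let j' := pvAdvance lo2 hi2 a2 j
            if h : j' < a2.length then
              if a2[j'] = x then some (j' + 1) else none
            else none
          else some j) (some j) with
      | none => false
      | some j => pvTailClean lo2 hi2 a2 j) =
    (a1.filter (fun x => decide (lo1 ≤ x ∧ x < hi1)) ==
      (a2.drop j).filter (fun x => decide (lo2 ≤ x ∧ x < hi2))) := by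
  induction a1 generalizing j with
  | nil => simpa using pvTailClean_eq lo2 hi2 a2 j
  | cons x rest ih =>
    simp only [List.foldl_cons, List.filter_cons]
    by_cases hk : lo1 ≤ x ∧ x < hi1
    · rw [if_pos hk, if_pos (by simpa using hk)]
      obtain ⟨hskip, hkept⟩ := pvAdvance_spec lo2 hi2 a2 j
      set j' := pvAdvance lo2 hi2 a2 j with hj'
      by_cases h : j' < a2.length
      · have hd2 : decide (lo2 ≤ a2[j'] ∧ a2[j'] < hi2) = true := by simpa using hkept h
        have hrhs : (a2.drop j).filter (fun x => decide (lo2 ≤ x ∧ x < hi2)) =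
            a2[j'] :: (a2.drop (j' + 1)).filter (fun x => decide (lo2 ≤ x ∧ x < hi2)) := by
          rw [hskip, List.drop_eq_getElem_cons h, List.filter_cons, hd2]
          simp
        rw [dif_pos h, hrhs]
        by_cases hx : a2[j'] = x
        · rw [if_pos hx, ih, hx]
          simp
        · rw [if_neg hx, foldl_none_absorb _ rfl]
          simp [Ne.symm hx]
      · have hdrop : a2.drop j' = [] := List.drop_eq_nil_of_le (by omega)
        rw [dif_neg h, foldl_none_absorb _ rfl, hskip, hdrop]
        simp
    · rw [if_neg hk, if_neg (by simpa using hk)]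
      exact ih j

-- ===== VERDICT =====
theorem isSequenceSameWithinRangePlus_spec : Claim_equal_isSequenceSameWithinRangePlus := by
  intro s1 e1 s2 e2 a1 a2 _ _
  unfold Spec_isSequenceSameWithinRangePlus
  unfold isSequenceSameWithinRangePlus isSequenceSameWithinRangePlus_alt
  rw [stack_eq_filter, stack_eq_filter]
  rw [loop_eq_filter]
  simp
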